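-- pv_equiv track=rewrite | github.com/shashankvmaiya/Algorithms-Data-Structures | LeetCode_python/src/dynamic_programming/maxcoin.py | maxcoin
-- ===== SOURCE A (Python) =====
-- def maxcoin(A):
--     n = len(A)
--     if n==1:
--         return A[0]
--     elif n==2:
--         return max(A)
--     elif n==3:
--         return max(A[0], A[2]) + min(A)
--
--     Atemp = A
--     coins_total = [0, 0]
--     player_idx = 0
--     for i in range(n):
--         if len(Atemp) == 3:
--             if Atemp[-1] > Atemp[0]:
--                 selected_coin = Atemp.pop()
--             else:
--                 selected_coin = Atemp.pop(0)
--             coins_total[player_idx] += selected_coin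
--             coins_total[player_idx] += min(Atemp)
--             coins_total[(player_idx+1)%2] += max(Atemp)
--             return coins_total[0]
--         if Atemp[-1]-max(Atemp[0], Atemp[-2]) > Atemp[0]-max(Atemp[-1], Atemp[1]):
--             selected_coin = Atemp.pop()
--         else:
--             selected_coin = Atemp.pop(0)
--         coins_total[player_idx] += selected_coin
--         player_idx = (player_idx+1)%2
-- ===== SOURCE B (Python) =====
-- def maxcoin(A):
--     n = len(A)
--     if n == 1:
--         return A[0]
--     if n == 2:
--         return max(A)
--     if n == 3:
--         return max(A[0], A[2]) + min(A)
--     lo, hi = 0, n - 1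
--     totals = [0, 0]
--     p = 0
--     while hi - lo > 2:
--         if A[hi] - max(A[lo], A[hi - 1]) > A[lo] - max(A[hi], A[lo + 1]):
--             totals[p] += A[hi]
--             hi -= 1
--         else:
--             totals[p] += A[lo]
--             lo += 1
--         p = 1 - p
--     # exactly three coins left: A[lo], A[lo+1], A[hi]
--     if A[hi] > A[lo]:
--         totals[p] += A[hi] + min(A[lo], A[lo + 1])
--         totals[1 - p] += max(A[lo], A[lo + 1])
--     else:
--         totals[p] += A[lo] + min(A[lo + 1], A[hi])
--         totals[1 - p] += max(A[lo + 1], A[hi])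
--     return totals[0]
-- ===== Notes on version B (the rewrite author's own statement) =====
-- stated objective: faster
-- what changed: B replaces A's destructive pop(0)/pop() on a shared list with two index pointers lo/hi into the untouched list, so each greedy step is O(1) instead of an O(n) front-pop, and B does not mutate the caller's list.
-- outside the precondition, e.g. on maxcoin([]): A returns None, B raises IndexError
import Mathlib
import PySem

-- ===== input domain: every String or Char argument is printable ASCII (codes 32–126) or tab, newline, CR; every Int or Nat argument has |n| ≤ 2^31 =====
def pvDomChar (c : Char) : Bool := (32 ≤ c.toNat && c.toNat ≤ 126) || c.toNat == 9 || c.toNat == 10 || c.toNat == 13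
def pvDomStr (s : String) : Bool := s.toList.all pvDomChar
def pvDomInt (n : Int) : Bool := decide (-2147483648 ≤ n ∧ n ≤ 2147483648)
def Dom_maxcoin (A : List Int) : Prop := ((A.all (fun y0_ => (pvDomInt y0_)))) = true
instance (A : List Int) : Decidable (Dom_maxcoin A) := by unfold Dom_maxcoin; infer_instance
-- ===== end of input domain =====

-- B replaces A's destructive pop(0)/pop() rounds with two index pointers into the untouched
-- list; Python A mutates its argument for len(A) >= 4, B does not — the equivalence proved
-- here is about the return value only.


-- ===== PORT A =====
-- coins_total is the pair c; 'coins_total[p] += v' (p tracked as a Nat, read mod 2):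
def pvAdd (c : Int × Int) (p : Nat) (v : Int) : Int × Int :=
  if p % 2 = 0 then (c.1 + v, c.2) else (c.1, c.2 + v)

-- the 'for i in range(n)' loop of A: fuel-counted, 'none' = the loop ended without returning
def maxcoinLoop (fuel : Nat) (Atemp : List Int) (c : Int × Int) (p : Nat) : Option Int :=
  match fuel with
  | 0 => none
  | Nat.succ fuel =>
    if Atemp.length = 3 then
      match PySem.List.pyGet? Atemp (-1), PySem.List.pyGet? Atemp 0 with
      | some last, some first =>
        -- selected_coin = Atemp.pop() / Atemp.pop(0)
        let sr : Int × List Int :=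
          if last > first then (last, Atemp.dropLast) else (first, Atemp.tail)
        match PySem.List.min? sr.2 (fun y => y), PySem.List.max? sr.2 (fun y => y) with
        | some mn, some mx =>
          let c := pvAdd c p (sr.1 + mn)
          let c := pvAdd c (p + 1) mx
          some c.1
        | _, _ => none
      | _, _ => none
    else
      match PySem.List.pyGet? Atemp (-1), PySem.List.pyGet? Atemp 0,
            PySem.List.pyGet? Atemp (-2), PySem.List.pyGet? Atemp 1 with
      | some am1, some a0, some am2, some a1 =>
        if am1 - max a0 am2 > a0 - max am1 a1 then
          maxcoinLoop fuel Atemp.dropLast (pvAdd c p am1) (p + 1)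
        else
          maxcoinLoop fuel Atemp.tail (pvAdd c p a0) (p + 1)
      | _, _, _, _ => none

def maxcoin (A : List Int) : Int :=
  let n := A.length
  if n = 1 then (PySem.List.pyGet? A 0).getD 0
  else if n = 2 then (PySem.List.max? A (fun y => y)).getD 0
  else if n = 3 then
    match PySem.List.pyGet? A 0, PySem.List.pyGet? A 2, PySem.List.min? A (fun y => y) with
    | some a0, some a2, some mn => max a0 a2 + mn
    | _, _, _ => 0
  else (maxcoinLoop n A (0, 0) 0).getD 0

-- ===== PORT B =====
-- the 'while hi - lo > 2' loop of B: two pointers into the untouched list A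
def maxcoinAltLoop (A : List Int) (lo hi : Nat) (c : Int × Int) (p : Nat) : Int :=
  if hi - lo > 2 then
    let alo := A.getD lo 0
    let ahi := A.getD hi 0
    if ahi - max alo (A.getD (hi - 1) 0) > alo - max ahi (A.getD (lo + 1) 0) then
      maxcoinAltLoop A lo (hi - 1) (pvAdd c p ahi) (1 - p)
    else
      maxcoinAltLoop A (lo + 1) hi (pvAdd c p alo) (1 - p)
  else
    -- exactly three coins left: A[lo], A[lo+1], A[hi]
    let alo := A.getD lo 0
    let a1 := A.getD (lo + 1) 0
    let ahi := A.getD hi 0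
    if ahi > alo then
      (pvAdd (pvAdd c p (ahi + min alo a1)) (1 - p) (max alo a1)).1
    else
      (pvAdd (pvAdd c p (alo + min a1 ahi)) (1 - p) (max a1 ahi)).1
termination_by hi - lo

def maxcoin_alt (A : List Int) : Int :=
  let n := A.length
  if n = 1 then (PySem.List.pyGet? A 0).getD 0
  else if n = 2 then (PySem.List.max? A (fun y => y)).getD 0
  else if n = 3 then
    match PySem.List.pyGet? A 0, PySem.List.pyGet? A 2, PySem.List.min? A (fun y => y) with
    | some a0, some a2, some mn => max a0 a2 + mn
    | _, _, _ => 0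
  else maxcoinAltLoop A 0 (n - 1) (0, 0) 0

-- ===== PRECONDITION & SPEC =====
-- Pre_ excludes only the empty list, on which Python A falls through its loop and returns
-- None (not an int); B raises IndexError there.
def Pre_maxcoin (A : List Int) : Prop := A ≠ []
instance (A : List Int) : Decidable (Pre_maxcoin A) := by unfold Pre_maxcoin; infer_instance
def pvWitness_maxcoin : List Int := [4, 7, 2, 9]

def Spec_maxcoin (A : List Int) (out : Int) : Prop := out = maxcoin_alt A
instance (A : List Int) (out : Int) : Decidable (Spec_maxcoin A out) := by unfold Spec_maxcoin; infer_instance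

-- ===== CLAIM (what is proved, stated in full; the proofs are below) =====
def Claim_equal_maxcoin : Prop := ∀ (A : List Int), Dom_maxcoin A → Pre_maxcoin A → Spec_maxcoin A (maxcoin A)

-- ===== LEMMAS AND PROOFS =====

-- pvAdd only reads p mod 2
theorem pvAdd_parity (c : Int × Int) (p p' : Nat) (v : Int) (h : p % 2 = p' % 2) :
    pvAdd c p v = pvAdd c p' v := by
  unfold pvAdd; rw [h]

-- the list segment A[lo..hi] that A's Atemp holds when B's pointers are lo, hi
def pvSeg (A : List Int) (lo hi : Nat) : List Int := (A.drop lo).take (hi + 1 - lo)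

theorem pvSeg_length (A : List Int) (lo hi : Nat) (h1 : hi < A.length) (h2 : lo ≤ hi) :
    (pvSeg A lo hi).length = hi + 1 - lo := by
  simp only [pvSeg, List.length_take, List.length_drop]
  omega

theorem pvSeg_getElem? (A : List Int) (lo hi k : Nat) (h1 : hi < A.length) (h2 : lo + k ≤ hi) :
    (pvSeg A lo hi)[k]? = some (A.getD (lo + k) 0) := by
  have hk : k < (pvSeg A lo hi).length := by rw [pvSeg_length A lo hi h1 (by omega)]; omega
  rw [List.getElem?_eq_getElem hk, List.getD_eq_getElem A 0 (by omega)]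
  simp only [pvSeg, List.getElem_take, List.getElem_drop]

theorem pvSeg_dropLast (A : List Int) (lo hi : Nat) (h1 : hi < A.length) (h2 : lo < hi) :
    (pvSeg A lo hi).dropLast = pvSeg A lo (hi - 1) := by
  simp only [pvSeg, List.dropLast_eq_take, List.length_take, List.length_drop, List.take_take]
  congr 1
  omega

theorem pvSeg_tail (A : List Int) (lo hi : Nat) :
    (pvSeg A lo hi).tail = pvSeg A (lo + 1) hi := by
  simp only [pvSeg, ← List.drop_one, List.drop_take, List.drop_drop]
  congr 1

theorem pvLoop_eq (A : List Int) :
    ∀ (fuel lo hi : Nat) (c : Int × Int) (p p' : Nat),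
      hi < A.length → lo + 2 ≤ hi → hi - lo ≤ fuel + 1 → p % 2 = p' →
      maxcoinLoop fuel (pvSeg A lo hi) c p = some (maxcoinAltLoop A lo hi c p') := by
  intro fuel
  induction fuel with
  | zero => intro lo hi c p p' h1 h2 h3 hp; omega
  | succ fuel ih =>
    intro lo hi c p p' h1 h2 h3 hp
    have hlen : (pvSeg A lo hi).length = hi + 1 - lo := pvSeg_length A lo hi h1 (by omega)
    have hm1 : PySem.List.pyGet? (pvSeg A lo hi) (-1) = some (A.getD hi 0) := by
      rw [PySem.List.pyGet?_neg_one, List.getLast?_eq_getElem?, hlen]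
      have he : hi + 1 - lo - 1 = hi - lo := by omega
      rw [he, pvSeg_getElem? A lo hi (hi - lo) h1 (by omega)]
      congr 2; omega
    have h0 : PySem.List.pyGet? (pvSeg A lo hi) 0 = some (A.getD lo 0) := by
      rw [PySem.List.pyGet?_zero, pvSeg_getElem? A lo hi 0 h1 (by omega)]
      norm_num
    by_cases hterm : hi - lo = 2
    · -- three coins left: terminal branch of both loops
      have h3len : (pvSeg A lo hi).length = 3 := by omega
      have hseg : pvSeg A lo hi = [A.getD lo 0, A.getD (lo + 1) 0, A.getD hi 0] := by
        apply List.ext_getElem?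
        intro k
        match k with
        | 0 => rw [pvSeg_getElem? A lo hi 0 h1 (by omega)]; rfl
        | 1 => rw [pvSeg_getElem? A lo hi 1 h1 (by omega)]; rfl
        | 2 =>
          rw [pvSeg_getElem? A lo hi 2 h1 (by omega)]
          simp only [List.getElem?_cons_succ, List.getElem?_cons_zero]
          congr 2; omega
        | (n + 3) => rw [List.getElem?_eq_none (by omega), List.getElem?_eq_none (by simp)]
      rw [maxcoinLoop, if_pos h3len, hm1, h0]
      rw [maxcoinAltLoop, if_neg (show ¬ hi - lo > 2 by omega)]
      by_cases hgt : A.getD hi 0 > A.getD lo 0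
      · rw [if_pos hgt]
        simp only [hseg, if_pos hgt, List.dropLast, PySem.List.min?_id_cons,
          PySem.List.max?_id_cons, List.foldl]
        rw [pvAdd_parity _ p p' _ (by omega), pvAdd_parity _ (p + 1) (1 - p') _ (by omega)]
      · rw [if_neg hgt]
        simp only [hseg, if_neg hgt, List.tail, PySem.List.min?_id_cons,
          PySem.List.max?_id_cons, List.foldl]
        rw [pvAdd_parity _ p p' _ (by omega), pvAdd_parity _ (p + 1) (1 - p') _ (by omega)]
    · -- more than three coins: one greedy step, then induction
      have hm2 : PySem.List.pyGet? (pvSeg A lo hi) (-2) = some (A.getD (hi - 1) 0) := by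
        rw [PySem.List.pyGet?_neg_ofNat _ 2 (by omega) (by omega)]
        rw [hlen]
        have he : hi + 1 - lo - 2 = hi - 1 - lo := by omega
        rw [he, pvSeg_getElem? A lo hi (hi - 1 - lo) h1 (by omega)]
        congr 2; omega
      have h1g : PySem.List.pyGet? (pvSeg A lo hi) 1 = some (A.getD (lo + 1) 0) := by
        rw [show (1 : Int) = ((1 : Nat) : Int) by norm_num, PySem.List.pyGet?_natCast]
        exact pvSeg_getElem? A lo hi 1 h1 (by omega)
      rw [maxcoinLoop, if_neg (by omega)]
      simp only [hm1, h0, hm2, h1g]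
      rw [maxcoinAltLoop, if_pos (show hi - lo > 2 by omega)]
      by_cases hc : A.getD hi 0 - max (A.getD lo 0) (A.getD (hi - 1) 0) >
          A.getD lo 0 - max (A.getD hi 0) (A.getD (lo + 1) 0)
      · rw [if_pos hc, if_pos hc, pvSeg_dropLast A lo hi (by omega) (by omega),
          pvAdd_parity _ p p' _ (by omega)]
        exact ih lo (hi - 1) _ (p + 1) (1 - p') (by omega) (by omega) (by omega) (by omega)
      · rw [if_neg hc, if_neg hc, pvSeg_tail,
          pvAdd_parity _ p p' _ (by omega)]
        exact ih (lo + 1) hi _ (p + 1) (1 - p') (by omega) (by omega) (by omega) (by omega)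

-- ===== VERDICT (by name: the statement is the Claim_ definition above) =====
theorem maxcoin_spec : Claim_equal_maxcoin := by
  intro A _ hpre
  unfold Spec_maxcoin maxcoin maxcoin_alt
  have hne : A.length ≠ 0 := by simpa [List.length_eq_zero_iff] using hpre
  by_cases h1 : A.length = 1
  · simp [h1]
  by_cases h2 : A.length = 2
  · simp [h2]
  by_cases h3 : A.length = 3
  · simp [h3]
  simp only [h1, h2, h3, if_false]
  have hseg : pvSeg A 0 (A.length - 1) = A := by
    unfold pvSeg
    rw [List.drop_zero]
    have : A.length - 1 + 1 - 0 = A.length := by omega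
    rw [this, List.take_length]
  have := pvLoop_eq A A.length 0 (A.length - 1) (0, 0) 0 0
    (by omega) (by omega) (by omega) (by omega)
  rw [hseg] at this
  rw [this]
  rfl
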